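-- pv_equiv track=rewrite | github.com/chojs23/problemSolving | 프로그래머스/pccp#1/3.py | query
-- ===== SOURCE A (Python) =====
-- def query(gen, index):
--     if gen == 1:
--         return "Rr"
--     parent_gene = query(gen - 1, index // 4)
--
--     if parent_gene == "RR":  # 유전자가 같은 경우.
--         return "RR"
--     if parent_gene == "rr":
--         return "rr"
--
--     # 유전자가 갈라지는 경우
--     local_index = index % 4
--
--     if local_index == 0:
--         return "RR"
--     if local_index in (1, 2):
--         return "Rr"
--     return "rr"
-- ===== SOURCE B (Python) =====
-- def query(gen, index):
--     # Iterative: scan base-4 digits of index from most significant (depth 1's child)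
--     # down; the first 0 locks "RR", the first 3 locks "rr", otherwise "Rr".
--     for i in range(gen - 2, -1, -1):
--         digit = (index // 4 ** i) % 4
--         if digit == 0:
--             return "RR"
--         if digit == 3:
--             return "rr"
--     return "Rr"
-- ===== Notes on version B (the rewrite author's own statement) =====
-- stated objective: simpler
-- what changed: Replaced the gen-deep recursion (which rebuilds the call stack and threads the parent's string back down) by a single loop over the base-4 digits of index from most significant to least, returning at the first decisive digit (0 -> 'RR', 3 -> 'rr') and 'Rr' if none is decisive.
import Mathlib
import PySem

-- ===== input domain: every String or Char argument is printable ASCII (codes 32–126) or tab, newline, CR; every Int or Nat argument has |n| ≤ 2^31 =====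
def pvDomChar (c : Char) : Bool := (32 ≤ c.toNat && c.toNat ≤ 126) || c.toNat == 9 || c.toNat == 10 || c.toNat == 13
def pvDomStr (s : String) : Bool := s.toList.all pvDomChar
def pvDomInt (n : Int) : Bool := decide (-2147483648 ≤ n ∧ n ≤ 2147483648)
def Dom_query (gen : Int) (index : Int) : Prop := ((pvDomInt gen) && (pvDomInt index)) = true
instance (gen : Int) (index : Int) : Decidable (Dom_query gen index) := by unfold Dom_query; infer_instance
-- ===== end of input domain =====

-- B replaces A's gen-deep recursion by one most-significant-first loop over the base-4 digits of index (objective: simpler).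

-- ===== PORT A =====
-- fuel = gen.toNat only makes the recursion total; under Pre_query (1 ≤ gen) it never runs out.
def queryGo : Nat → Int → Int → String
  | 0, _, _ => "Rr"
  | fuel + 1, gen, index =>
    if gen = 1 then "Rr"
    else
      let parent_gene := queryGo fuel (gen - 1) (PySem.Int.floordiv index 4)
      if parent_gene = "RR" then "RR"
      else if parent_gene = "rr" then "rr"
      else
        let local_index := PySem.Int.mod index 4
        if local_index = 0 then "RR"
        else if local_index = 1 ∨ local_index = 2 then "Rr"
        else "rr"

def query (gen : Int) (index : Int) : String := queryGo gen.toNat gen index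

-- ===== PORT B =====
-- loop body: early-return is modelled by the Option accumulator (some s = already returned)
def queryStep (index : Int) (acc : Option String) (i : Int) : Option String :=
  match acc with
  | some s => some s
  | none =>
    let digit := PySem.Int.mod (PySem.Int.floordiv index (4 ^ i.toNat)) 4
    if digit = 0 then some "RR"
    else if digit = 3 then some "rr"
    else none

def query_alt (gen : Int) (index : Int) : String :=
  match (PySem.List.pyRange (gen - 2) (-1) (-1)).foldl (queryStep index) none with
  | some s => s
  | none => "Rr"

-- ===== PRECONDITION & SPEC =====
-- Pre_ excludes gen < 1, on which A recurses without a base case and raises (RecursionError).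
def Pre_query (gen : Int) (index : Int) : Prop := 1 ≤ gen
instance (gen : Int) (index : Int) : Decidable (Pre_query gen index) := by unfold Pre_query; infer_instance
def pvWitness_query : Int × Int := (3, 5)
def Spec_query (gen : Int) (index : Int) (out : String) : Prop := out = query_alt gen index
instance (gen : Int) (index : Int) (out : String) : Decidable (Spec_query gen index out) := by unfold Spec_query; infer_instance

-- ===== CLAIM (what is proved, stated in full; the proofs are below) =====
def Claim_equal_query : Prop := ∀ (gen : Int) (index : Int), Dom_query gen index → Pre_query gen index → Spec_query gen index (query gen index)

-- ===== LEMMAS AND PROOFS =====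

-- A only ever returns one of the three genotype strings.
-- one-step unfolding of A's recursion
lemma queryGo_succ (fuel : Nat) (gen index : Int) :
    queryGo (fuel + 1) gen index =
      if gen = 1 then "Rr"
      else
        if queryGo fuel (gen - 1) (PySem.Int.floordiv index 4) = "RR" then "RR"
        else if queryGo fuel (gen - 1) (PySem.Int.floordiv index 4) = "rr" then "rr"
        else
          if PySem.Int.mod index 4 = 0 then "RR"
          else if PySem.Int.mod index 4 = 1 ∨ PySem.Int.mod index 4 = 2 then "Rr"
          else "rr" := rfl

-- A only ever returns one of the three genotype strings.
lemma queryGo_values (fuel : Nat) (gen index : Int) :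
    queryGo fuel gen index = "RR" ∨ queryGo fuel gen index = "rr" ∨ queryGo fuel gen index = "Rr" := by
  induction fuel generalizing gen index with
  | zero => simp [queryGo]
  | succ f ih =>
    rw [queryGo_succ]
    split_ifs <;> tauto

lemma query_natSucc (n : Nat) (index : Int) :
    query ((n : Int) + 1) index = queryGo (n + 1) ((n : Int) + 1) index := by
  have h : ((n : Int) + 1).toNat = n + 1 := by omega
  unfold query
  rw [h]

-- dividing twice = dividing by the product (floor division, positive divisors)
lemma fdiv_fdiv (x : Int) (k : Nat) :
    PySem.Int.floordiv (PySem.Int.floordiv x 4) (4 ^ k) = PySem.Int.floordiv x (4 ^ (k + 1)) := by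
  rw [PySem.Int.floordiv_eq_ediv_of_pos (a := x) (by norm_num),
      PySem.Int.floordiv_eq_ediv_of_pos (by positivity),
      PySem.Int.floordiv_eq_ediv_of_pos (by positivity),
      Int.ediv_ediv_of_nonneg (by norm_num)]
  congr 1
  ring

-- [n, n-1, …, 0] = (shift [n-1, …, 0] up by one) ++ [0]
lemma range_decomp (n : Nat) :
    PySem.List.pyRange (n : Int) (-1) (-1)
      = ((PySem.List.pyRange ((n : Int) - 1) (-1) (-1)).map (· + 1)) ++ [0] := by
  rw [PySem.List.pyRange_neg_one, PySem.List.pyRange_neg_one]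
  have h1 : ((n : Int) - (-1)).toNat = n + 1 := by omega
  have h2 : ((n : Int) - 1 - (-1)).toNat = n := by omega
  rw [h1, h2, List.range_succ, List.map_append, List.map_map]
  have : ((fun x => x + 1) ∘ fun k : Nat => (n : Int) - 1 - (k : Int)) = (fun k : Nat => (n : Int) - (k : Int)) := by
    funext k; simp; ring
  rw [this]
  simp

-- scanning shifted digits of index = scanning digits of index // 4
lemma step_shift (n : Nat) (index : Int) (acc : Option String) :
    ((PySem.List.pyRange ((n : Int) - 1) (-1) (-1)).map (· + 1)).foldl (queryStep index) acc
      = (PySem.List.pyRange ((n : Int) - 1) (-1) (-1)).foldl (queryStep (PySem.Int.floordiv index 4)) acc := by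
  rw [List.foldl_map]
  apply PySem.List.foldl_congr_mem
  intro a i hi
  have hi0 : 0 ≤ i := by
    have := (PySem.List.mem_pyRange_neg_one.mp hi).1
    omega
  cases a with
  | some s => rfl
  | none =>
    simp only [queryStep]
    have h1 : (i + 1).toNat = i.toNat + 1 := by omega
    rw [h1, ← fdiv_fdiv]

-- the last digit index % 4 decides exactly as A's local_index branch does
lemma step_last (index : Int) :
    queryStep index none 0
      = (if (if PySem.Int.mod index 4 = 0 then "RR"
             else if PySem.Int.mod index 4 = 1 ∨ PySem.Int.mod index 4 = 2 then "Rr"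
             else ("rr" : String)) = "Rr" then none
         else some (if PySem.Int.mod index 4 = 0 then "RR"
             else if PySem.Int.mod index 4 = 1 ∨ PySem.Int.mod index 4 = 2 then "Rr"
             else "rr")) := by
  simp only [queryStep]
  rw [show ((4 : Int) ^ (0 : Int).toNat) = 1 by norm_num,
      show PySem.Int.floordiv index 1 = index by
        rw [PySem.Int.floordiv_eq_ediv_of_pos (by norm_num)]; exact Int.ediv_one index]
  have hme : PySem.Int.mod index 4 = index % 4 := PySem.Int.mod_eq_emod_of_pos (by norm_num)
  have hlo : 0 ≤ index % 4 := Int.emod_nonneg index (by norm_num)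
  have hhi : index % 4 < 4 := Int.emod_lt_of_pos index (by norm_num)
  have h : index % 4 = 0 ∨ index % 4 = 1 ∨ index % 4 = 2 ∨ index % 4 = 3 := by omega
  rcases h with h | h | h | h <;> rw [hme, h] <;> simp

-- the fold over the gen-1 most significant digits equals A, with "Rr" encoded as none
lemma scan_eq (n : Nat) (index : Int) :
    (PySem.List.pyRange ((n : Int) - 1) (-1) (-1)).foldl (queryStep index) none
      = (if query ((n : Int) + 1) index = "Rr" then none else some (query ((n : Int) + 1) index)) := by
  induction n generalizing index with
  | zero =>
    rw [PySem.List.pyRange_neg_one_eq_nil (by norm_num)]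
    simp [query, queryGo]
  | succ m ih =>
    have hc : ((m + 1 : Nat) : Int) - 1 = ((m : Nat) : Int) := by push_cast; ring
    rw [hc, range_decomp, List.foldl_append, step_shift, ih]
    rw [query_natSucc (m + 1) index, queryGo_succ]
    rw [if_neg (show ¬ ((m + 1 : Nat) : Int) + 1 = 1 by push_cast; omega)]
    rw [show ((m + 1 : Nat) : Int) + 1 - 1 = ((m : Nat) : Int) + 1 by push_cast; ring]
    have hv := queryGo_values (m + 1) ((m : Int) + 1) (PySem.Int.floordiv index 4)
    rw [← query_natSucc m (PySem.Int.floordiv index 4)] at hv ⊢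
    rcases hv with hp | hp | hp <;> rw [hp]
    · simp [queryStep]
    · simp [queryStep]
    · simp only [List.foldl, if_true]
      rw [step_last index]
      simp

-- ===== VERDICT (by name: the statement is the Claim_ definition above) =====
theorem query_spec : Claim_equal_query := by
  intro gen index _ hpre
  unfold Spec_query query_alt
  have hn : gen = ((gen - 1).toNat : Int) + 1 := by
    have := Int.toNat_of_nonneg (show 0 ≤ gen - 1 by exact Int.sub_nonneg.mpr hpre)
    omega
  set n := (gen - 1).toNat with hndef
  have hc : gen - 2 = (n : Int) - 1 := by omega
  rw [hc, scan_eq n index, ← hn]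
  split_ifs with h
  · exact h
  · rfl
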